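-- pv_equiv track=rewrite | github.com/moridani/asr_project | models/translator.py | _group_segments_by_language
-- ===== SOURCE A (Python) =====
-- from typing import Dict, Any, List, Optional, Union, Tuple
--
-- def _group_segments_by_language(
--
--     segments: List[Dict[str, Any]]
-- ) -> Dict[str, List[Dict[str, Any]]]:
--     """Group segments by language for batch processing."""
--     groups = {}
--     for segment in segments:
--         lang = segment.get('language', 'und')
--         if lang not in groups:
--             groups[lang] = []
--         groups[lang].append(segment)
--     return groups
-- ===== SOURCE B (Python) =====
-- def _group_segments_by_language(segments):
--     """Group segments by language: first collect the distinct languages in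
--     order of first appearance, then build each group by filtering."""
--     order = []
--     for segment in segments:
--         lang = segment.get('language', 'und')
--         if lang not in order:
--             order.append(lang)
--     return {lang: [s for s in segments if s.get('language', 'und') == lang]
--             for lang in order}
-- ===== Notes on version B (the rewrite author's own statement) =====
-- stated objective: alternative
-- what changed: Replaces the single-pass running-dict accumulation with a two-phase strategy: one pass collecting the distinct languages in first-appearance order, then a per-language filter comprehension building each group.
import Mathlib
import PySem

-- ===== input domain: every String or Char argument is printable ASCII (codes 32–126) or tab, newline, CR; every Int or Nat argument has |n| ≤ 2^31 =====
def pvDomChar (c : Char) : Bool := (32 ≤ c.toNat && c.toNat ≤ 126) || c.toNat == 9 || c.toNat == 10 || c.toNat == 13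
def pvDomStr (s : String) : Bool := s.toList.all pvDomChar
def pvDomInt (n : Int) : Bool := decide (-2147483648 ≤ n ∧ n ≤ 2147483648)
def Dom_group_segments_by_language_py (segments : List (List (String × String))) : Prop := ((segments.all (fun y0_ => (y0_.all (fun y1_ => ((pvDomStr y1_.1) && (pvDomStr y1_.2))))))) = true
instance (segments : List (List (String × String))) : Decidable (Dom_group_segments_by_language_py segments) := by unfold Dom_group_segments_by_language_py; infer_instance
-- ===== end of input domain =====

-- B groups by a distinct-languages pass followed by per-language filters instead of A's running-dict accumulation; alternative decomposition, same results.

-- segment.get('language', 'und') (exact: first-match association-list lookup, as Python dict.get)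
def pvLangOf (segment : List (String × String)) : String :=
  (PySem.Dict.mk segment).getD "language" "und"

-- ===== PORT A =====
def group_segments_by_language_py (segments : List (List (String × String))) : List (String × List (List (String × String))) :=
  (segments.foldl (fun groups segment =>
      let lang := pvLangOf segment
      let groups := if groups.contains lang then groups
                    else groups.insert lang ([] : List (List (String × String)))
      groups.insert lang (groups.getD lang [] ++ [segment]))
    PySem.Dict.empty).items

-- ===== PORT B =====
def group_segments_by_language_py_alt (segments : List (List (String × String))) : List (String × List (List (String × String))) :=
  let order := segments.foldl (fun order segment =>
      let lang := pvLangOf segment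
      if order.contains lang then order else order ++ [lang]) ([] : List String)
  order.map (fun lang => (lang, segments.filter (fun s => pvLangOf s == lang)))

-- ===== PRECONDITION & SPEC =====
def Spec_group_segments_by_language_py (segments : List (List (String × String))) (out : List (String × List (List (String × String)))) : Prop := out = group_segments_by_language_py_alt segments
instance (segments : List (List (String × String))) (out : List (String × List (List (String × String)))) : Decidable (Spec_group_segments_by_language_py segments out) := by unfold Spec_group_segments_by_language_py; infer_instance

-- ===== CLAIM (what is proved, stated in full; the proofs are below) =====
def Claim_equal_group_segments_by_language_py : Prop := ∀ (segments : List (List (String × String))), Dom_group_segments_by_language_py segments → Spec_group_segments_by_language_py segments (group_segments_by_language_py segments)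

-- ===== LEMMAS AND PROOFS =====

-- A's loop body is a single insert of the extended group
theorem pvStepA_eq (d : PySem.Dict String (List (List (String × String)))) (s : List (String × String)) :
    (let lang := pvLangOf s
     let d' := if d.contains lang then d else d.insert lang ([] : List (List (String × String)))
     d'.insert lang (d'.getD lang [] ++ [s]))
    = d.insert (pvLangOf s) (d.getD (pvLangOf s) [] ++ [s]) := by
  by_cases h : d.contains (pvLangOf s) = true
  · simp [h]
  · simp only [Bool.not_eq_true] at h
    simp [h, PySem.Dict.insert_insert_self, PySem.Dict.getD_insert_self,
      PySem.Dict.getD_of_not_contains _ _ h]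

def pvFoldA (d : PySem.Dict String (List (List (String × String)))) (xs : List (List (String × String))) :
    PySem.Dict String (List (List (String × String))) :=
  xs.foldl (fun d s => d.insert (pvLangOf s) (d.getD (pvLangOf s) [] ++ [s])) d

theorem pvFoldA_eq (xs : List (List (String × String))) (d : PySem.Dict String (List (List (String × String)))) :
    xs.foldl (fun groups segment =>
      let lang := pvLangOf segment
      let groups := if groups.contains lang then groups
                    else groups.insert lang ([] : List (List (String × String)))
      groups.insert lang (groups.getD lang [] ++ [segment])) d = pvFoldA d xs := by
  induction xs generalizing d with
  | nil => rfl
  | cons x xs ih => simp only [pvFoldA, List.foldl_cons, pvStepA_eq]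

theorem pvFoldA_getD (xs : List (List (String × String))) (d : PySem.Dict String (List (List (String × String)))) (c : String) :
    (pvFoldA d xs).getD c [] = d.getD c [] ++ xs.filter (fun s => pvLangOf s == c) := by
  induction xs generalizing d with
  | nil => simp [pvFoldA]
  | cons x xs ih =>
    simp only [pvFoldA, List.foldl_cons] at *
    rw [ih]
    by_cases h : pvLangOf x = c
    · simp [h, PySem.Dict.getD_insert_self]
    · have h' : (pvLangOf x == c) = false := by simp [h]
      rw [PySem.Dict.getD_insert_of_ne _ _ _ (fun hc => h hc.symm)]
      simp [h']

theorem pvFoldA_keys (xs : List (List (String × String))) (d : PySem.Dict String (List (List (String × String)))) :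
    (pvFoldA d xs).keys = xs.foldl (fun order s =>
      if order.contains (pvLangOf s) then order else order ++ [pvLangOf s]) d.keys := by
  induction xs generalizing d with
  | nil => rfl
  | cons x xs ih =>
    simp only [pvFoldA, List.foldl_cons] at *
    rw [ih]
    congr 1
    by_cases h : d.contains (pvLangOf x) = true
    · rw [PySem.Dict.keys_insert_of_contains _ _ h]
      have hm : pvLangOf x ∈ d.keys := by
        rw [PySem.Dict.contains_eq_decide_mem_keys] at h
        simpa using h
      simp [hm]
    · simp only [Bool.not_eq_true] at h
      rw [PySem.Dict.keys_insert_of_not_contains _ _ h]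
      have hm : pvLangOf x ∉ d.keys := by
        rw [PySem.Dict.contains_eq_decide_mem_keys] at h
        simpa using h
      simp [hm]

theorem pvFoldA_nodup (xs : List (List (String × String))) :
    (pvFoldA PySem.Dict.empty xs).keys.Nodup :=
  PySem.Dict.nodup_keys_foldl_insert_key xs pvLangOf _ _ PySem.Dict.nodup_keys_empty

-- ===== VERDICT (by name: the statement is the Claim_ definition above) =====
theorem group_segments_by_language_py_spec : Claim_equal_group_segments_by_language_py := by
  intro segments _
  unfold Spec_group_segments_by_language_py group_segments_by_language_py group_segments_by_language_py_alt
  rw [pvFoldA_eq]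
  rw [PySem.Dict.items_eq_map_keys _ (pvFoldA_nodup segments) []]
  rw [pvFoldA_keys]
  simp only [PySem.Dict.keys_empty]
  refine List.map_congr_left (fun lang _ => ?_)
  rw [pvFoldA_getD]
  simp [PySem.Dict.getD_empty]
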